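-- pv_equiv track=rewrite | github.com/bdusell/nondeterministic-stack-rnn | src/print_grid_search.py | aggregate_dicts
-- ===== SOURCE A (Python) =====
-- def aggregate_dicts(dicts):
--     result = {}
--     keys = None
--     initial = True
--     for d in dicts:
--         if initial:
--             keys = d.keys()
--             for k in keys:
--                 result[k] = []
--             initial = False
--         else:
--             if d.keys() != keys:
--                 raise ValueError
--         for k, v in d.items():
--             result[k].append(v)
--     return result
-- ===== SOURCE B (Python) =====
-- def aggregate_dicts(dicts):
--     dicts = list(dicts)
--     if not dicts:
--         return {}
--     keys = dicts[0].keys()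
--     for d in dicts[1:]:
--         if d.keys() != keys:
--             raise ValueError
--     return {k: [d[k] for d in dicts] for k in keys}
-- ===== Notes on version B (the rewrite author's own statement) =====
-- stated objective: simpler
-- what changed: B separates validation (one pass checking every later dict has the first dict's key set, raising ValueError on the first mismatch) from construction, which is a single key-major dict comprehension {k: [d[k] for d in dicts]}, instead of A's dict-major pass that lazily initializes the result and appends value by value.
import Mathlib
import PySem

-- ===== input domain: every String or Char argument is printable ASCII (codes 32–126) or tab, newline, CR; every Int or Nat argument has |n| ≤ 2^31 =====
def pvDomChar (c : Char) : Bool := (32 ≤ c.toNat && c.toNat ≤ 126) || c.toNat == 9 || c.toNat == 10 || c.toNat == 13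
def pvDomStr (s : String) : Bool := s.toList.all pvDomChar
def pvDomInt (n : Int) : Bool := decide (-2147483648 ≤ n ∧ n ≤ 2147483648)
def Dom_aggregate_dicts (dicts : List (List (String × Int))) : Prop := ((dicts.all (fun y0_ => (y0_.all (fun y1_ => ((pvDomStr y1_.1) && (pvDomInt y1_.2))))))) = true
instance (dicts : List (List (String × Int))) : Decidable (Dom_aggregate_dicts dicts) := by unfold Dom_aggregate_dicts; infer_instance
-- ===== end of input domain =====

-- B separates key-set validation from key-major construction; objective: simpler. A=B proved on Pre_ (equal key sets, distinct keys within each dict).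


-- ===== PORT A =====
-- d.keys() == keys : Python dict_keys comparison is SET equality
def keysetEq (a b : List String) : Bool := a.all b.contains && b.all a.contains

-- 'for k, v in d.items(): result[k].append(v)' — modify with default []; on Pre_ the key is always present, matching Python's result[k]
def pyAppendAll (r : PySem.Dict String (List Int)) (d : List (String × Int)) : PySem.Dict String (List Int) :=
  d.foldl (fun r p => r.modify p.1 [] (fun l => l ++ [p.2])) r

-- the for-loop of A; 'none' = raise ValueError (excluded by Pre_)
def aggA : List (List (String × Int)) → PySem.Dict String (List Int) → Option (List String) → Option (PySem.Dict String (List Int))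
  | [], r, _ => some r
  | d :: rest, r, none =>
      let keys := d.map Prod.fst
      aggA rest (pyAppendAll (keys.foldl (fun r k => r.insert k ([] : List Int)) r) d) (some keys)
  | d :: rest, r, some keys =>
      if keysetEq (d.map Prod.fst) keys then aggA rest (pyAppendAll r d) (some keys)
      else none

def aggregate_dicts (dicts : List (List (String × Int))) : List (String × List Int) :=
  ((aggA dicts PySem.Dict.empty none).getD PySem.Dict.empty).items

-- ===== PORT B =====
-- validation pass, then key-major comprehension {k: [d[k] for d in dicts] for k in keys}; d[k] via Dict.getD (key present after validation)
def aggregate_dicts_alt (dicts : List (List (String × Int))) : List (String × List Int) :=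
  match dicts with
  | [] => []
  | d0 :: rest =>
    let keys := d0.map Prod.fst
    if rest.all (fun d => keysetEq (d.map Prod.fst) keys) then
      keys.map (fun k => (k, dicts.map (fun d => (PySem.Dict.mk d).getD k 0)))
    else []  -- raise ValueError (excluded by Pre_)

-- ===== PRECONDITION & SPEC =====
-- Pre_ excludes (a) inputs where some later dict's key set differs from the first's — there A (and B) raise ValueError —
-- and (b) inner lists with duplicate keys, which do not arise from Python dicts (the argument type is list[dict[str,int]]).
def Pre_aggregate_dicts (dicts : List (List (String × Int))) : Prop :=
  ∀ d ∈ dicts, (d.map Prod.fst).Nodup ∧ keysetEq (d.map Prod.fst) ((dicts.headD []).map Prod.fst) = true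
instance (dicts : List (List (String × Int))) : Decidable (Pre_aggregate_dicts dicts) := by unfold Pre_aggregate_dicts; infer_instance
def pvWitness_aggregate_dicts : (List (List (String × Int))) := [[("a", 1), ("b", 2)], [("b", 3), ("a", 4)]]

def Spec_aggregate_dicts (dicts : List (List (String × Int))) (out : List (String × List Int)) : Prop := out = aggregate_dicts_alt dicts
instance (dicts : List (List (String × Int))) (out : List (String × List Int)) : Decidable (Spec_aggregate_dicts dicts out) := by unfold Spec_aggregate_dicts; infer_instance

-- ===== CLAIM (what is proved, stated in full; the proofs are below) =====
def Claim_equal_aggregate_dicts : Prop := ∀ (dicts : List (List (String × Int))), Dom_aggregate_dicts dicts → Pre_aggregate_dicts dicts → Spec_aggregate_dicts dicts (aggregate_dicts dicts)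

-- ===== LEMMAS AND PROOFS =====

theorem keysetEq_mem {a b : List String} (h : keysetEq a b = true) : ∀ x, (x ∈ a ↔ x ∈ b) := by
  intro x
  simp only [keysetEq, Bool.and_eq_true, List.all_eq_true, List.contains_iff_mem] at h
  exact ⟨fun hx => h.1 x hx, fun hx => h.2 x hx⟩

-- the A-loop with an established key list never raises and is a plain fold
theorem aggA_some (ks : List String) :
    ∀ (ds : List (List (String × Int))) (r : PySem.Dict String (List Int)),
      (∀ d ∈ ds, keysetEq (d.map Prod.fst) ks = true) →
      aggA ds r (some ks) = some (ds.foldl pyAppendAll r) := by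
  intro ds
  induction ds with
  | nil => intro r _; rfl
  | cons d rest ih =>
      intro r h
      simp only [aggA, h d (by simp), if_true, List.foldl_cons]
      exact ih _ (fun d' hd' => h d' (by simp [hd']))

theorem keys_pyAppendAll (r : PySem.Dict String (List Int)) (d : List (String × Int))
    (h : ∀ p ∈ d, p.1 ∈ r.keys) : (pyAppendAll r d).keys = r.keys := by
  unfold pyAppendAll
  rw [PySem.Dict.keys_foldl_modify_key d Prod.fst [] (fun _ p => (fun l => l ++ [p.2])) r]
  rw [PySem.Set.update_eq_append_filter]
  have h2 : (PySem.Set.ofList (d.map Prod.fst)).filter (fun y => !(PySem.Set.contains r.keys y)) = [] := by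
    rw [List.filter_eq_nil_iff]
    intro y hy
    have : y ∈ d.map Prod.fst := (PySem.Set.mem_ofList _ _).1 hy
    obtain ⟨p, hp, rfl⟩ := List.mem_map.1 this
    simp [PySem.Set.contains, h p hp]
  rw [h2, List.append_nil]

theorem filter_singleton (k : String) :
    ∀ (d : List (String × Int)), (d.map Prod.fst).Nodup → k ∈ d.map Prod.fst →
      (d.filter (fun p => p.1 == k)).map Prod.snd = [(PySem.Dict.mk d).getD k 0] := by
  intro d
  induction d with
  | nil => intro _ h; simp at h
  | cons p rest ih =>
      obtain ⟨a, v⟩ := p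
      intro hnd hk
      simp only [List.map_cons, List.nodup_cons] at hnd
      rw [List.filter_cons]
      by_cases hp : a = k
      · have hres : rest.filter (fun q => q.1 == k) = [] := by
          rw [List.filter_eq_nil_iff]
          intro q hq
          simp only [beq_iff_eq]
          intro h1
          have hm := List.mem_map_of_mem (f := Prod.fst) hq
          rw [h1, ← hp] at hm
          exact hnd.1 hm
        simp [hp, hres, PySem.Dict.getD_eq_get?_getD, PySem.Dict.get?_mk_cons]
      · simp only [beq_iff_eq, hp, if_false]
        rw [ih hnd.2 (by rcases List.mem_cons.1 hk with h | h; exact absurd h.symm hp; exact h)]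
        rw [PySem.Dict.getD_eq_get?_getD, PySem.Dict.getD_eq_get?_getD, PySem.Dict.get?_mk_cons]
        simp [hp]

theorem init_items (ks : List String) (hndks : ks.Nodup) :
    (ks.foldl (fun r k => r.insert k ([] : List Int)) PySem.Dict.empty).items
      = ks.map (fun k => (k, ([] : List Int))) := by
  simpa using PySem.Dict.items_foldl_insert_fresh ks (fun x => x) (fun _ => ([] : List Int))
    PySem.Dict.empty (fun a _ => by simp) (by simpa using hndks)

theorem keys_foldl_pyAppendAll (ks : List String) :
    ∀ (ds : List (List (String × Int))) (r : PySem.Dict String (List Int)),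
      r.keys = ks → (∀ d ∈ ds, ∀ p ∈ d, p.1 ∈ ks) →
      (ds.foldl pyAppendAll r).keys = ks := by
  intro ds
  induction ds with
  | nil => intro r hr _; simpa using hr
  | cons d rest ih =>
      intro r hr h
      simp only [List.foldl_cons]
      refine ih _ ?_ (fun d' hd' => h d' (by simp [hd']))
      rw [keys_pyAppendAll r d (fun p hp => by rw [hr]; exact h d (by simp) p hp)]
      exact hr

theorem getD_foldl_pyAppendAll (k : String) :
    ∀ (ds : List (List (String × Int))) (r : PySem.Dict String (List Int)),
      (ds.foldl pyAppendAll r).getD k [] =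
        r.getD k [] ++ ds.flatMap (fun d => (d.filter (fun p => p.1 == k)).map Prod.snd) := by
  intro ds
  induction ds with
  | nil => intro r; simp
  | cons d rest ih =>
      intro r
      simp only [List.foldl_cons, List.flatMap_cons]
      rw [ih, pyAppendAll, PySem.Dict.getD_foldl_modify_append, List.append_assoc]

theorem flatMap_eq_map_of_singleton {α β : Type} (g : α → β) :
    ∀ (ds : List α) (F : α → List β), (∀ d ∈ ds, F d = [g d]) → ds.flatMap F = ds.map g := by
  intro ds
  induction ds with
  | nil => intro F _; rfl
  | cons d rest ih =>
      intro F h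
      simp only [List.flatMap_cons, List.map_cons, h d (by simp)]
      rw [ih F (fun d' hd' => h d' (by simp [hd']))]
      rfl

-- ===== VERDICT (by name: the statement is the Claim_ definition above) =====
theorem aggregate_dicts_spec : Claim_equal_aggregate_dicts := by
  intro dicts _ hpre
  unfold Spec_aggregate_dicts
  match dicts with
  | [] => rfl
  | d0 :: rest =>
    unfold Pre_aggregate_dicts at hpre
    simp only [List.headD_cons] at hpre
    have hnd : ∀ d ∈ (d0 :: rest), (d.map Prod.fst).Nodup := fun d hd => (hpre d hd).1
    have hall : ∀ d ∈ rest, keysetEq (d.map Prod.fst) (d0.map Prod.fst) = true :=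
      fun d hd => (hpre d (List.mem_cons_of_mem _ hd)).2
    set ks := d0.map Prod.fst with hksdef
    have hB : aggregate_dicts_alt (d0 :: rest) =
        ks.map (fun k => (k, (d0 :: rest).map (fun d => (PySem.Dict.mk d).getD k 0))) := by
      simp only [aggregate_dicts_alt]
      rw [if_pos (by rw [List.all_eq_true]; intro d hd; exact hall d hd)]
    have hsub : ∀ d ∈ (d0 :: rest), ∀ p ∈ d, p.1 ∈ ks := by
      intro d hd p hp
      rcases List.mem_cons.1 hd with rfl | hd'
      · exact List.mem_map_of_mem hp
      · exact (keysetEq_mem (hall d hd') p.1).1 (List.mem_map_of_mem hp)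
    have hndks : ks.Nodup := hnd d0 (by simp)
    set r0 := ks.foldl (fun r k => r.insert k ([] : List Int)) PySem.Dict.empty with hr0
    have hinit : r0.items = ks.map (fun k => (k, ([] : List Int))) := init_items ks hndks
    have hr0keys : r0.keys = ks := by
      show r0.items.map Prod.fst = ks
      rw [hinit]; simp [Function.comp_def]
    have hr0getD : ∀ k, r0.getD k [] = [] := by
      intro k
      by_cases hk : k ∈ ks
      · exact PySem.Dict.getD_of_mem_items r0 (by rw [hinit]; exact List.mem_map_of_mem hk)
          (by rw [hr0keys]; exact hndks) []
      · refine PySem.Dict.getD_of_not_contains _ _ ?_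
        rw [PySem.Dict.contains_eq_decide_mem_keys, hr0keys]; simp [hk]
    have hA : aggregate_dicts (d0 :: rest) = (((d0 :: rest).foldl pyAppendAll r0)).items := by
      simp only [aggregate_dicts, aggA]
      rw [aggA_some ks rest (pyAppendAll r0 d0) hall]
      rfl
    set Rfin := (d0 :: rest).foldl pyAppendAll r0 with hRfin
    have hkeys : Rfin.keys = ks := keys_foldl_pyAppendAll ks (d0 :: rest) r0 hr0keys hsub
    have hitems : Rfin.items = ks.map (fun k => (k, Rfin.getD k [])) := by
      have h := PySem.Dict.items_eq_map_keys Rfin (by rw [hkeys]; exact hndks) ([] : List Int)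
      rwa [hkeys] at h
    rw [hA, hitems, hB]
    refine List.map_congr_left ?_
    intro k hkmem
    refine Prod.ext rfl ?_
    show Rfin.getD k [] = (d0 :: rest).map (fun d => (PySem.Dict.mk d).getD k 0)
    rw [hRfin, getD_foldl_pyAppendAll, hr0getD, List.nil_append]
    refine flatMap_eq_map_of_singleton _ (d0 :: rest) _ ?_
    intro d hd
    refine filter_singleton k d (hnd d hd) ?_
    rcases List.mem_cons.1 hd with rfl | hd'
    · exact hkmem
    · exact (keysetEq_mem (hall d hd') k).2 hkmem
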